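-- pv_equiv track=rewrite | github.com/EyeOfPython/notifybch | run.py | format_bch_amount
-- ===== SOURCE A (Python) =====
-- def format_bch_amount(satoshis: int):
--     fract_part = satoshis % 100_000_000
--     fract_part_str = '{:0>8d}'.format(fract_part)
--     parts = fract_part_str[:3], fract_part_str[3:6], fract_part_str[6:]
--     for i, part in reversed(list(enumerate(parts))):
--         if any(char != '0' for char in part):
--             parts = parts[:i + 1]
--             break
--     else:
--         parts = ()
--     whole_part = satoshis // 100_000_000
--     fract_part_str = '\xa0'.join(parts)
--     if fract_part_str:
--         return f'{whole_part:,}.{fract_part_str} BCH'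
--     else:
--         return f'{whole_part:,} BCH'
-- ===== SOURCE B (Python) =====
-- def format_bch_amount(satoshis: int):
--     whole_part = satoshis // 100_000_000
--     fract = '{:0>8d}'.format(satoshis % 100_000_000)
--     n = len(fract.rstrip('0'))
--     groups = (n + 2) // 3
--     if groups:
--         fract_str = '\xa0'.join([fract[:3], fract[3:6], fract[6:]][:groups])
--         return f'{whole_part:,}.{fract_str} BCH'
--     return f'{whole_part:,} BCH'
-- ===== Notes on version B (the rewrite author's own statement) =====
-- stated objective: simpler
-- what changed: A's reversed scan-and-break loop over the three fraction digit groups is replaced by a closed-form group count (len(fract.rstrip('0')) + 2) // 3 and a single slice of the fixed group list.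
import Mathlib
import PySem

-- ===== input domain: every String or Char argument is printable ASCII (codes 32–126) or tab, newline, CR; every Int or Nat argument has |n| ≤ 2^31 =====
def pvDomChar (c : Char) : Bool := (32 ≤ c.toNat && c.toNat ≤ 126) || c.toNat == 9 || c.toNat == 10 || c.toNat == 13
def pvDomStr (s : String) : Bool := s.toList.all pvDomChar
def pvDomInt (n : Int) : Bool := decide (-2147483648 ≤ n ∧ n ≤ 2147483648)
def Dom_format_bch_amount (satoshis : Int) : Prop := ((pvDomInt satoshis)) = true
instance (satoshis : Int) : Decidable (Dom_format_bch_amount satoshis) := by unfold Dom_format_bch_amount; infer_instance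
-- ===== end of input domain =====

-- B replaces A's reversed scan-and-break loop over the three digit groups by a closed-form
-- group count (len(fract.rstrip('0')) + 2) // 3 and a single slice of the fixed group list
-- (objective: simpler; same cost).

-- shared helper: f'{n:,}' — decimal with ',' every three digits from the right ('-' in front for n < 0).
-- Ported by hand (no PySem primitive); exact for every int.
def pvGroup3rev : List Char → List Char
  | a :: b :: c :: d :: rest => a :: b :: c :: ',' :: pvGroup3rev (d :: rest)
  | l => l

def pvCommaFmt (n : Int) : List Char :=
  if n < 0 then '-' :: (pvGroup3rev (PySem.Int.toChars (-n)).reverse).reverse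
  else (pvGroup3rev (PySem.Int.toChars n).reverse).reverse

-- ===== PORT A =====
-- the for-loop over reversed(list(enumerate(parts))) with break / else;
-- parts[:i + 1] is PySem.List.slice (i ≥ 0 here)
def pvLoopA (rev : List (Int × List Char)) (parts : List (List Char)) : List (List Char) :=
  match rev with
  | [] => []  -- the loop's 'else: parts = ()'
  | (i, part) :: rest =>
      if part.any (fun ch => decide (ch ≠ '0')) then PySem.List.slice parts none (some (i + 1))
      else pvLoopA rest parts

-- '{:0>8d}'.format(m) = zfill for m ≥ 0 (the only case reached: m = satoshis % 10^8 ≥ 0)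
def format_bch_amount (satoshis : Int) : String :=
  let fract_part : Int := PySem.Int.mod satoshis 100000000
  let fract_part_str : List Char := PySem.Chars.zfill (PySem.Int.toChars fract_part) 8
  let parts : List (List Char) :=
    [PySem.List.slice fract_part_str none (some 3),
     PySem.List.slice fract_part_str (some 3) (some 6),
     PySem.List.slice fract_part_str (some 6) none]
  let parts := pvLoopA (PySem.List.enumerate parts).reverse parts
  let whole_part : Int := PySem.Int.floordiv satoshis 100000000
  let fract_str : List Char := PySem.Chars.join ['\xA0'] parts
  if fract_str ≠ [] then
    String.ofList (pvCommaFmt whole_part ++ '.' :: fract_str ++ [' ', 'B', 'C', 'H'])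
  else
    String.ofList (pvCommaFmt whole_part ++ [' ', 'B', 'C', 'H'])

-- ===== PORT B =====
-- fract.rstrip('0') ported by hand as reverse/dropWhile/reverse (exact); fract[:3], fract[3:6],
-- fract[6:] as take/drop (exact: the indices are literal non-negative ints)
def format_bch_amount_alt (satoshis : Int) : String :=
  let whole_part : Int := PySem.Int.floordiv satoshis 100000000
  let fract : List Char := PySem.Chars.zfill (PySem.Int.toChars (PySem.Int.mod satoshis 100000000)) 8
  let n : Nat := ((fract.reverse.dropWhile (fun c => c == '0')).reverse).length
  let groups : Nat := (n + 2) / 3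
  if groups ≠ 0 then
    String.ofList (pvCommaFmt whole_part ++ '.' ::
      PySem.Chars.join ['\xA0'] (([fract.take 3, (fract.drop 3).take 3, fract.drop 6]).take groups) ++
      [' ', 'B', 'C', 'H'])
  else
    String.ofList (pvCommaFmt whole_part ++ [' ', 'B', 'C', 'H'])

-- ===== PRECONDITION & SPEC =====
def Spec_format_bch_amount (satoshis : Int) (out : String) : Prop := out = format_bch_amount_alt satoshis
instance (satoshis : Int) (out : String) : Decidable (Spec_format_bch_amount satoshis out) := by unfold Spec_format_bch_amount; infer_instance

-- ===== CLAIM (what is proved, stated in full; the proofs are below) =====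
def Claim_equal_format_bch_amount : Prop := ∀ (satoshis : Int), Dom_format_bch_amount satoshis → Spec_format_bch_amount satoshis (format_bch_amount satoshis)

-- ===== LEMMAS AND PROOFS =====

lemma pv_len8 (l : List Char) (h : l.length = 8) :
    ∃ a b c d e f g k, l = [a, b, c, d, e, f, g, k] := by
  rcases l with _ | ⟨a, _ | ⟨b, _ | ⟨c, _ | ⟨d, _ | ⟨e, _ | ⟨f, _ | ⟨g, _ | ⟨k, _ | ⟨i, t⟩⟩⟩⟩⟩⟩⟩⟩⟩ <;>
    simp_all

-- the heart of the equivalence: on any 8-character fraction string, A's reversed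
-- scan-and-break selection of groups agrees with B's closed-form (n+2)/3 selection,
-- and the two final branches coincide.
set_option maxHeartbeats 2000000 in
lemma pv_key (w : List Char) (c0 c1 c2 c3 c4 c5 c6 c7 : Char) :
    (let fract_part_str := [c0, c1, c2, c3, c4, c5, c6, c7]
     let parts : List (List Char) :=
       [PySem.List.slice fract_part_str none (some 3),
        PySem.List.slice fract_part_str (some 3) (some 6),
        PySem.List.slice fract_part_str (some 6) none]
     let parts := pvLoopA (PySem.List.enumerate parts).reverse parts
     let fract_str : List Char := PySem.Chars.join ['\xA0'] parts
     if fract_str ≠ [] then String.ofList (w ++ '.' :: fract_str ++ [' ', 'B', 'C', 'H'])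
     else String.ofList (w ++ [' ', 'B', 'C', 'H'])) =
    (let fract : List Char := [c0, c1, c2, c3, c4, c5, c6, c7]
     let n : Nat := ((fract.reverse.dropWhile (fun c => c == '0')).reverse).length
     let groups : Nat := (n + 2) / 3
     if groups ≠ 0 then
       String.ofList (w ++ '.' ::
         PySem.Chars.join ['\xA0'] (([fract.take 3, (fract.drop 3).take 3, fract.drop 6]).take groups) ++
         [' ', 'B', 'C', 'H'])
     else String.ofList (w ++ [' ', 'B', 'C', 'H'])) := by
  simp only [PySem.List.slice, PySem.List.enumerate, PySem.Chars.join]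
  norm_num
  by_cases h7 : c7 = '0' <;> by_cases h6 : c6 = '0' <;> by_cases h5 : c5 = '0' <;>
    by_cases h4 : c4 = '0' <;> by_cases h3 : c3 = '0' <;> by_cases h2 : c2 = '0' <;>
    by_cases h1 : c1 = '0' <;> by_cases h0 : c0 = '0' <;>
    simp_all [pvLoopA, PySem.List.slice, List.intercalate]

-- ===== VERDICT (by name: the statement is the Claim_ definition above) =====
theorem format_bch_amount_spec : Claim_equal_format_bch_amount := by
  intro satoshis _
  unfold Spec_format_bch_amount format_bch_amount format_bch_amount_alt
  have hmn : (0:Int) ≤ PySem.Int.mod satoshis 100000000 := PySem.Int.mod_nonneg _ (by norm_num)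
  have hml : PySem.Int.mod satoshis 100000000 < 100000000 := PySem.Int.mod_lt _ (by norm_num)
  generalize PySem.Int.mod satoshis 100000000 = m at *
  have hlen : (PySem.Int.toChars m).length ≤ 8 := by
    rw [PySem.Int.toChars, if_neg (by omega)]
    exact Nat.toDigits_length 10 m.toNat 8 (by norm_num) (by omega)
  have h8 : (PySem.Chars.zfill (PySem.Int.toChars m) 8).length = 8 := by
    rw [PySem.Chars.length_zfill]; omega
  obtain ⟨c0, c1, c2, c3, c4, c5, c6, c7, hf⟩ := pv_len8 _ h8
  simp only [hf]
  exact pv_key (pvCommaFmt (PySem.Int.floordiv satoshis 100000000)) c0 c1 c2 c3 c4 c5 c6 c7
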